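-- pv_equiv track=rewrite | github.com/chenchienlin/Algorithmic-Toolbox | week6/maximize_absolute_displacement.py | recursive_process_command
-- ===== SOURCE A (Python) =====
-- def recursive_process_command(seq, i):
--     if i == len(seq):
--         return 0, 0
--     else:
--         a, b = recursive_process_command(seq, i+1)
--         if seq[i] == 'R':
--             return a+1, b+1
--         elif seq[i] == 'L':
--             return a-1, b-1
--         elif seq[i] == '?':
--             return a+1, b-1
-- ===== SOURCE B (Python) =====
-- DELTAS = {'R': (1, 1), 'L': (-1, -1), '?': (1, -1)}
--
-- def recursive_process_command(seq, i):
--     a = b = 0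
--     for j in range(i, len(seq)):
--         da, db = DELTAS[seq[j]]
--         a += da
--         b += db
--     return a, b
-- ===== Notes on version B (the rewrite author's own statement) =====
-- stated objective: idiomatic
-- what changed: Replaces the linear recursion (recurse to the end of the string, then add each command's delta on the way back) with a single iterative loop over range(i, len(seq)) that accumulates the deltas looked up in a constant table.
-- outside the precondition, e.g. on recursive_process_command('X', 0): A returns None, B raises KeyError
import Mathlib
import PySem

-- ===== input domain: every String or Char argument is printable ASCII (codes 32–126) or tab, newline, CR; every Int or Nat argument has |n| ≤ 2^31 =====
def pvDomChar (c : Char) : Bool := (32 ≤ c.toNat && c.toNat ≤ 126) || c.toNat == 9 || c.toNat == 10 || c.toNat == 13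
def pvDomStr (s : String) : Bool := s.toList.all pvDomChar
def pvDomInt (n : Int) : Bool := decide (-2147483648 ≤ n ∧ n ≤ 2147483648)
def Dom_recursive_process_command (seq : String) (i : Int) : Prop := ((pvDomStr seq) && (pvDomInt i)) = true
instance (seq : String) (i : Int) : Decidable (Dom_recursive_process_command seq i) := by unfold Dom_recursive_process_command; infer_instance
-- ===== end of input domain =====

-- B replaces A's linear recursion with a single iterative accumulation loop (simpler, O(1) space).


-- ===== PORT A =====
-- A recurses from i up to len(seq): base case returns (0,0); otherwise it first computes the
-- pair for the tail and then adds the delta of seq[i].  Fuel ((len-i).toNat) makes the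
-- recursion structural; fuel runs out / the final '_' branch fires only where the Python
-- raises (RecursionError / TypeError on unpacking None), which Pre_ excludes.
def pvA_go (s : List Char) (i : Int) (fuel : Nat) : Int × Int :=
  if i = (s.length : Int) then (0, 0)
  else
    match fuel with
    | 0 => (0, 0)
    | f + 1 =>
      let p := pvA_go s (i + 1) f
      match PySem.List.pyGet? s i with
      | some c =>
        if c = 'R' then (p.1 + 1, p.2 + 1)
        else if c = 'L' then (p.1 - 1, p.2 - 1)
        else if c = '?' then (p.1 + 1, p.2 - 1)
        else (0, 0)
      | none => (0, 0)

def recursive_process_command (seq : String) (i : Int) : Int × Int :=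
  pvA_go seq.toList i (((seq.toList.length : Int) - i).toNat)

-- ===== PORT B =====
-- B's module-level delta table DELTAS
def pvB_deltas : PySem.Dict Char (Int × Int) := PySem.Dict.ofList [('R', (1, 1)), ('L', (-1, -1)), ('?', (1, -1))]

-- one step of B's loop body: add the table delta of seq[j] to the accumulator;
-- the two 'p' fallbacks are where the Python raises (KeyError / IndexError), outside Pre_
def pvB_step (s : List Char) (p : Int × Int) (j : Int) : Int × Int :=
  match PySem.List.pyGet? s j with
  | some c =>
    match PySem.Dict.get? pvB_deltas c with
    | some d => (p.1 + d.1, p.2 + d.2)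
    | none => p
  | none => p

def recursive_process_command_alt (seq : String) (i : Int) : Int × Int :=
  (PySem.List.pyRange i (seq.toList.length : Int) 1).foldl (pvB_step seq.toList) (0, 0)

-- ===== PRECONDITION & SPEC =====
-- Pre_ excludes exactly the inputs where the Python A does not return a tuple:
-- i > len(seq) (RecursionError), i < -len(seq) (IndexError), a non-R/L/? character at a
-- position after i (TypeError unpacking None), and a non-R/L/? character at position i
-- itself (A returns None, not a pair of ints).
def Pre_recursive_process_command (seq : String) (i : Int) : Prop :=
  -(seq.toList.length : Int) ≤ i ∧ i ≤ (seq.toList.length : Int) ∧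
    ∀ j ∈ PySem.List.pyRange i (seq.toList.length : Int) 1,
      PySem.List.pyGet? seq.toList j = some 'R' ∨
      PySem.List.pyGet? seq.toList j = some 'L' ∨
      PySem.List.pyGet? seq.toList j = some '?'

instance (seq : String) (i : Int) : Decidable (Pre_recursive_process_command seq i) := by
  unfold Pre_recursive_process_command; infer_instance

def pvWitness_recursive_process_command : String × Int := ("RL?", 0)

def Spec_recursive_process_command (seq : String) (i : Int) (out : Int × Int) : Prop :=
  out = recursive_process_command_alt seq i
instance (seq : String) (i : Int) (out : Int × Int) : Decidable (Spec_recursive_process_command seq i out) := by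
  unfold Spec_recursive_process_command; infer_instance

-- ===== CLAIM (what is proved, stated in full; the proofs are below) =====
def Claim_equal_recursive_process_command : Prop := ∀ (seq : String) (i : Int), Dom_recursive_process_command seq i → Pre_recursive_process_command seq i → Spec_recursive_process_command seq i (recursive_process_command seq i)

-- ===== LEMMAS AND PROOFS =====

-- One B-step is a translation of the accumulator by the step's own delta.
theorem pvB_step_shift (s : List Char) (p : Int × Int) (j : Int) :
    pvB_step s p j = (p.1 + (pvB_step s (0, 0) j).1, p.2 + (pvB_step s (0, 0) j).2) := by
  unfold pvB_step
  rcases h : PySem.List.pyGet? s j with _ | c <;> simp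
  rcases PySem.Dict.get? pvB_deltas c with _ | d <;> simp

-- Linearity of B's fold in its initial accumulator.
theorem pvB_foldl_shift (s : List Char) (l : List Int) (p : Int × Int) :
    l.foldl (pvB_step s) p =
      (p.1 + (l.foldl (pvB_step s) (0, 0)).1, p.2 + (l.foldl (pvB_step s) (0, 0)).2) := by
  induction l generalizing p with
  | nil => simp
  | cons x xs ih =>
    simp only [List.foldl_cons]
    rw [ih (pvB_step s p x), ih (pvB_step s (0, 0) x), pvB_step_shift s p x]
    simp
    constructor <;> ring

-- the three table lookups B's loop performs
theorem pvB_deltas_R : PySem.Dict.get? pvB_deltas 'R' = some (1, 1) := by decide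
theorem pvB_deltas_L : PySem.Dict.get? pvB_deltas 'L' = some (-1, -1) := by decide
theorem pvB_deltas_Q : PySem.Dict.get? pvB_deltas '?' = some (1, -1) := by decide

-- Main invariant: on valid inputs the recursion equals the fold over range(i, n).
theorem pvA_eq_fold (s : List Char) (fuel : Nat) :
    ∀ i : Int, fuel = (((s.length : Int)) - i).toNat →
      -(s.length : Int) ≤ i → i ≤ (s.length : Int) →
      (∀ j ∈ PySem.List.pyRange i (s.length : Int) 1,
        PySem.List.pyGet? s j = some 'R' ∨ PySem.List.pyGet? s j = some 'L' ∨
        PySem.List.pyGet? s j = some '?') →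
      pvA_go s i fuel = (PySem.List.pyRange i (s.length : Int) 1).foldl (pvB_step s) (0, 0) := by
  induction fuel with
  | zero =>
    intro i hf h1 h2 _
    have hi : i = (s.length : Int) := by omega
    simp [pvA_go, hi, PySem.List.pyRange_one_eq_nil le_rfl]
  | succ f ih =>
    intro i hf h1 h2 hv
    by_cases hi : i = (s.length : Int)
    · simp [pvA_go, hi, PySem.List.pyRange_one_eq_nil le_rfl]
    · have hlt : i < (s.length : Int) := lt_of_le_of_ne h2 hi
      have hmem : i ∈ PySem.List.pyRange i (s.length : Int) 1 :=
        (PySem.List.mem_pyRange_one).2 ⟨le_rfl, hlt⟩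
      have hrec := ih (i + 1) (by omega) (by omega) (by omega)
        (fun j hj => hv j (by
          rw [PySem.List.pyRange_one_cons hlt]; exact List.mem_cons_of_mem _ hj))
      rw [PySem.List.pyRange_one_cons hlt, List.foldl_cons,
        pvB_foldl_shift s _ (pvB_step s (0, 0) i)]
      rcases hv i hmem with hc | hc | hc <;>
        simp [pvA_go, hi, hc, hrec, pvB_step, pvB_deltas_R, pvB_deltas_L, pvB_deltas_Q] <;> omega

-- ===== VERDICT (by name: the statement is the Claim_ definition above) =====
theorem recursive_process_command_spec : Claim_equal_recursive_process_command := by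
  intro seq i _ hpre
  unfold Spec_recursive_process_command recursive_process_command recursive_process_command_alt
  exact pvA_eq_fold seq.toList _ i rfl hpre.1 hpre.2.1 hpre.2.2
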